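-- pv_equiv track=rewrite | github.com/jaemyungchoi95/AlgorithmStudy | 프로그래머스/0/181935. 홀짝에 따라 다른 값 반환하기/홀짝에 따라 다른 값 반환하기.py | solution
-- ===== SOURCE A (Python) =====
-- def solution(n):
--     answer = 0
--     nArr = list(range(1,n+1))
--
--     if n%2 == 0: # even
--         for i in range(1, n, 2):
--             answer += nArr[i]**2
--
--     elif n%2 != 0: # odd
--         for i in range(0, n, 2):
--             answer += nArr[i]
--
--     return answer
-- ===== SOURCE B (Python) =====
-- def solution(n):
--     if n < 1:
--         return 0
--     if n % 2 == 0: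
--         m = n // 2
--         return 2 * m * (m + 1) * (2 * m + 1) // 3
--     return ((n + 1) // 2) ** 2
-- ===== Notes on version B (the rewrite author's own statement) =====
-- stated objective: faster
-- what changed: Replaced A's construction of the list range(1,n+1) and its linear parity loop by closed-form arithmetic formulas (sum-of-even-squares formula for the even case, square of the count of odds for the odd case, empty sum for nonpositive n).
import Mathlib
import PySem

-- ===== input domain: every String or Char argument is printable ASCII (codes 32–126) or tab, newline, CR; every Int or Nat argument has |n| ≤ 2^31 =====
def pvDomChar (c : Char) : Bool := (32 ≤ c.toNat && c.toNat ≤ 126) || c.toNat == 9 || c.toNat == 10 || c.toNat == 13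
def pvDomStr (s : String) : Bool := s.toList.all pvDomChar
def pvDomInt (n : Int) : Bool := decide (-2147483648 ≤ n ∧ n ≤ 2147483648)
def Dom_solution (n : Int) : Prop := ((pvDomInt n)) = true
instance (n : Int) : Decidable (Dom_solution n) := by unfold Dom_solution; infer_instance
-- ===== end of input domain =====

-- B replaces A's O(n) list-building loop by O(1) closed-form parity formulas (asymptotically faster).


-- ===== PORT A =====
def solution (n : Int) : Int :=
  let answer : Int := 0
  let nArr := PySem.List.pyRange 1 (n + 1) 1
  if PySem.Int.mod n 2 = 0 then
    (PySem.List.pyRange 1 n 2).foldl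
      (fun answer i => answer + (PySem.List.pyGetD nArr i 0) ^ 2) answer
  else if PySem.Int.mod n 2 ≠ 0 then
    (PySem.List.pyRange 0 n 2).foldl
      (fun answer i => answer + PySem.List.pyGetD nArr i 0) answer
  else answer

-- ===== PORT B =====
def solution_alt (n : Int) : Int :=
  if n < 1 then 0
  else if PySem.Int.mod n 2 = 0 then
    let m := PySem.Int.floordiv n 2
    PySem.Int.floordiv (2 * m * (m + 1) * (2 * m + 1)) 3
  else (PySem.Int.floordiv (n + 1) 2) ^ 2

-- ===== PRECONDITION & SPEC =====
def Spec_solution (n : Int) (out : Int) : Prop := out = solution_alt n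
instance (n : Int) (out : Int) : Decidable (Spec_solution n out) := by unfold Spec_solution; infer_instance

-- ===== CLAIM (what is proved, stated in full; the proofs are below) =====
def Claim_equal_solution : Prop := ∀ (n : Int), Dom_solution n → Spec_solution n (solution n)

-- ===== LEMMAS AND PROOFS =====

lemma pv_sum_even_sq (t : Nat) :
    ((List.range t).map (fun k : Nat => ((2:Int) * (k:Int) + 2) ^ 2)).sum * 3
      = 2 * (t : Int) * ((t : Int) + 1) * (2 * (t : Int) + 1) := by
  induction t with
  | zero => simp
  | succ t ih =>
      rw [List.range_succ, List.map_append, List.sum_append]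
      simp only [List.map_cons, List.map_nil, List.sum_cons, List.sum_nil]
      push_cast
      linear_combination ih

lemma pv_sum_odd (t : Nat) :
    ((List.range t).map (fun k : Nat => (1:Int) + 2 * (k:Int))).sum = (t : Int) ^ 2 := by
  induction t with
  | zero => simp
  | succ t ih =>
      rw [List.range_succ, List.map_append, List.sum_append]
      simp only [List.map_cons, List.map_nil, List.sum_cons, List.sum_nil]
      push_cast
      linear_combination ih

-- nArr = list(range(1, n+1)) indexed at i ∈ [0, n) is i + 1
lemma pv_nArr_get (n i : Int) (h0 : 0 ≤ i) (h1 : i < n) :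
    PySem.List.pyGetD (PySem.List.pyRange 1 (n + 1) 1) i 0 = 1 + i := by
  have hlen : (PySem.List.pyRange 1 (n + 1) 1).length = n.toNat := by
    rw [PySem.List.length_pyRange_one]; congr 1; omega
  rw [PySem.List.pyGetD_eq_getElem _ _ h0 (by rw [hlen]; omega)]
  rw [PySem.List.getElem_pyRange_one]
  omega

-- ===== VERDICT (by name: the statement is the Claim_ definition above) =====
theorem solution_spec : Claim_equal_solution := by
  intro n _
  unfold Spec_solution solution solution_alt
  have h2 : (0:Int) < 2 := by norm_num
  by_cases hlt : n < 1
  · -- both sides are 0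
    simp only [if_pos hlt]
    by_cases hm : PySem.Int.mod n 2 = 0
    · rw [if_pos hm, PySem.List.pyRange_of_pos 1 n h2, if_neg (by omega)]
      simp
    · rw [if_neg hm, if_pos hm, PySem.List.pyRange_of_pos 0 n h2, if_neg (by omega)]
      simp
  · simp only [if_neg hlt]
    rw [not_lt] at hlt
    by_cases hm : PySem.Int.mod n 2 = 0
    · -- even case: n = 2m, m ≥ 1
      rw [if_pos hm, if_pos hm]
      obtain ⟨m, hn⟩ : (2:Int) ∣ n := (PySem.Int.mod_eq_zero_iff_dvd n 2).mp hm
      have hm1 : 1 ≤ m := by omega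
      rw [PySem.List.foldl_congr_mem _ _ (fun acc i => acc + (1 + i) ^ 2) _
            (by
              intro acc i hi
              obtain ⟨hi1, hi2, _⟩ := (PySem.List.mem_pyRange_iff_of_pos h2 i).mp hi
              rw [pv_nArr_get n i (by omega) hi2])]
      rw [PySem.List.foldl_add, PySem.List.pyRange_of_pos 1 n h2, if_pos (by omega),
          List.map_map]
      have hfun : ((fun i => (1 + i) ^ 2) ∘ fun k : Nat => (1:Int) + 2 * k)
          = fun k : Nat => ((2:Int) * k + 2) ^ 2 := by funext k; simp; ring
      rw [hfun]
      set t : Nat := ((n - 1 + 2 - 1) / 2).toNat with ht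
      have htm : (t : Int) = m := by
        have : n - 1 + 2 - 1 = 2 * m := by omega
        rw [ht, this]
        omega
      have hsum := pv_sum_even_sq t
      rw [htm] at hsum
      rw [PySem.Int.floordiv_eq_ediv_of_pos (by norm_num : (0:Int) < 2),
          PySem.Int.floordiv_eq_ediv_of_pos (by norm_num : (0:Int) < 3)]
      have hnd : n / 2 = m := by omega
      rw [hnd]
      have : 2 * m * (m + 1) * (2 * m + 1)
          = ((List.range t).map (fun k : Nat => ((2:Int) * (k:Int) + 2) ^ 2)).sum * 3 := hsum.symm
      rw [this, Int.mul_ediv_cancel _ (by norm_num)]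
      omega
    · -- odd case: n = 2m + 1, m ≥ 0
      rw [if_neg hm, if_pos hm, if_neg hm]
      have hodd : ¬ (2:Int) ∣ n := fun h => hm ((PySem.Int.mod_eq_zero_iff_dvd n 2).mpr h)
      obtain ⟨m, hn⟩ : ∃ m, n = 2 * m + 1 := by
        rcases Int.even_or_odd n with ⟨k, hk⟩ | ⟨k, hk⟩
        · exact absurd ⟨k, by omega⟩ hodd
        · exact ⟨k, hk⟩
      have hm0 : 0 ≤ m := by omega
      rw [PySem.List.foldl_congr_mem _ _ (fun acc i => acc + (1 + i)) _
            (by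
              intro acc i hi
              obtain ⟨hi1, hi2, _⟩ := (PySem.List.mem_pyRange_iff_of_pos h2 i).mp hi
              rw [pv_nArr_get n i (by omega) hi2])]
      rw [PySem.List.foldl_add, PySem.List.pyRange_of_pos 0 n h2, if_pos (by omega),
          List.map_map]
      have hfun : ((fun i => 1 + i) ∘ fun k : Nat => (0:Int) + 2 * k)
          = fun k : Nat => (1:Int) + 2 * k := by funext k; simp
      rw [hfun]
      set t : Nat := ((n - 0 + 2 - 1) / 2).toNat with ht
      have htm : (t : Int) = m + 1 := by
        have : n - 0 + 2 - 1 = 2 * m + 2 := by omega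
        rw [ht, this]
        omega
      have hsum := pv_sum_odd t
      rw [htm] at hsum
      rw [hsum, PySem.Int.floordiv_eq_ediv_of_pos (by norm_num : (0:Int) < 2)]
      have : (n + 1) / 2 = m + 1 := by omega
      rw [this]
      ring
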